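-- pv_equiv track=rewrite | github.com/PavelPatsey/leetcode | py/medium/1861/1861.py | _convert
-- ===== SOURCE A (Python) =====
-- from typing import List
--
-- def _convert(row: List[str]) -> List[str]:
--     stone = "#"
--     obstacle = "*"
--     empty = "."
--     converted = []
--     stone_number = empty_number = 0
--     for item in row:
--         if item == obstacle:
--             converted.extend(
--                 [empty] * empty_number + [stone] * stone_number + [obstacle]
--             )
--             stone_number = empty_number = 0
--         elif item == stone:
--             stone_number += 1
--         elif item == empty:
--             empty_number += 1
--         else:
--             raise Exception("Error in else case!")
--     converted.extend([empty] * empty_number + [stone] * stone_number)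
--     return converted
-- ===== SOURCE B (Python) =====
-- from typing import List
--
--
-- def _settle(seg):
--     # settle one obstacle-free segment: all stones fall to its right end
--     stones = 0
--     for item in seg:
--         if item == "#":
--             stones += 1
--         elif item != ".":
--             raise Exception("Error in else case!")
--     return ["."] * (len(seg) - stones) + ["#"] * stones
--
--
-- def _convert(row: List[str]) -> List[str]:
--     res = []
--     rest = row
--     while "*" in rest:
--         i = rest.index("*")
--         res += _settle(rest[:i]) + ["*"]
--         rest = rest[i + 1:]
--     return res + _settle(rest)
-- ===== Notes on version B (the rewrite author's own statement) =====
-- stated objective: alternative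
-- what changed: B splits the row at each obstacle and settles every obstacle-free segment wholesale via a stone count and list arithmetic, instead of A's single pass that maintains running stone/empty counters and flushes them at each obstacle.
import Mathlib
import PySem

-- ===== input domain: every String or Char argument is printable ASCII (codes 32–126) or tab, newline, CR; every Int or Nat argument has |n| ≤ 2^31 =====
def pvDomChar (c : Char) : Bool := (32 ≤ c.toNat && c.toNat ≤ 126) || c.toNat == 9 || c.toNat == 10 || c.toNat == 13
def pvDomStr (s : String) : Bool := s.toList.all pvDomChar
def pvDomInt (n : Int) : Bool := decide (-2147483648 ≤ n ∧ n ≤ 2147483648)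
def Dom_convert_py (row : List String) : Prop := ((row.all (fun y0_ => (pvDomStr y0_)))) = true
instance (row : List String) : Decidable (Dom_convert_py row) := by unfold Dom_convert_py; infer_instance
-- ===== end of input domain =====

-- B settles each obstacle-free segment wholesale (stone count + list arithmetic) instead of
-- A's running stone/empty counters flushed at every obstacle; same cost, different decomposition.

-- ===== PORT A =====
-- A's single loop: accumulator `conv`, running counters s (stones) and e (empties);
-- `none` models the `raise Exception` branch.
def aLoop : List String → List String → Nat → Nat → Option (List String)
  | [], conv, s, e => some (conv ++ (List.replicate e "." ++ List.replicate s "#"))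
  | item :: rest, conv, s, e =>
    if item = "*" then
      aLoop rest (conv ++ (List.replicate e "." ++ List.replicate s "#" ++ ["*"])) 0 0
    else if item = "#" then aLoop rest conv (s + 1) e
    else if item = "." then aLoop rest conv s (e + 1)
    else none

def convert_py (row : List String) : List String := (aLoop row [] 0 0).getD []

-- ===== PORT B =====
-- _settle's counting loop; `none` models the raise.
def settleGo : List String → Nat → Option Nat
  | [], st => some st
  | x :: r, st =>
    if x = "#" then settleGo r (st + 1)
    else if x = "." then settleGo r st
    else none

-- _settle(seg) = ["."]*(len-stones) + ["#"]*stones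
def settle (seg : List String) : Option (List String) :=
  (settleGo seg 0).map (fun st => List.replicate (seg.length - st) "." ++ List.replicate st "#")

-- helper for altLoop's termination: index? is some where "*" ∈ rest, and it is in range
theorem pv_index_lt {rest : List String} (h : "*" ∈ rest) :
    ((PySem.List.index? rest "*").getD 0) < rest.length := by
  obtain ⟨i, hi⟩ := Option.isSome_iff_exists.mp ((PySem.List.index?_isSome_iff rest "*").mpr h)
  obtain ⟨hk, -, -⟩ := PySem.List.getElem_of_index?_eq_some hi
  rw [hi]; simpa using hk

-- B's while loop: split at the first obstacle, settle the segment, recurse on the remainder.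
-- (`.getD 0` only discharges the Option: under the `in` test the index is always present.)
def altLoop (res rest : List String) : Option (List String) :=
  if h : "*" ∈ rest then
    let i := (PySem.List.index? rest "*").getD 0
    match settle (rest.take i) with
    | none => none
    | some sl => altLoop (res ++ sl ++ ["*"]) (rest.drop (i + 1))
  else (settle rest).map (res ++ ·)
termination_by rest.length
decreasing_by
  have := pv_index_lt h
  simp only [List.length_drop]
  omega

def convert_py_alt (row : List String) : List String := (altLoop [] row).getD []

-- ===== PRECONDITION & SPEC =====
-- A raises Exception on any item other than ".", "#", "*"; exactly those inputs are excluded.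
def Pre_convert_py (row : List String) : Prop :=
  ∀ item ∈ row, item = "." ∨ item = "#" ∨ item = "*"
instance (row : List String) : Decidable (Pre_convert_py row) := by
  unfold Pre_convert_py; infer_instance
def pvWitness_convert_py : List String := [".", "#", ".", "*", "#", "."]

def Spec_convert_py (row : List String) (out : List String) : Prop := out = convert_py_alt row
instance (row : List String) (out : List String) : Decidable (Spec_convert_py row out) := by
  unfold Spec_convert_py; infer_instance

-- ===== CLAIM (what is proved, stated in full; the proofs are below) =====
def Claim_equal_convert_py : Prop :=
  ∀ (row : List String), Dom_convert_py row → Pre_convert_py row →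
    Spec_convert_py row (convert_py row)

-- ===== LEMMAS AND PROOFS =====

theorem settleGo_bounds :
    ∀ (seg : List String) (s st : Nat), settleGo seg s = some st → s ≤ st ∧ st ≤ s + seg.length := by
  intro seg
  induction seg with
  | nil => intro s st h; simp [settleGo] at h; omega
  | cons x r ih =>
    intro s st h
    by_cases h1 : x = "#"
    · have := ih (s + 1) st (by simpa [settleGo, h1] using h)
      simp; omega
    · by_cases h2 : x = "."
      · have := ih s st (by simpa [settleGo, h1, h2] using h)
        simp; omega
      · simp [settleGo, h1, h2] at h

-- A's loop on an obstacle-free segment just counts: it equals settleGo with the tallies folded in.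
theorem aLoop_noStar :
    ∀ (seg conv : List String) (s e : Nat), "*" ∉ seg →
      aLoop seg conv s e = (settleGo seg s).map
        (fun st => conv ++ (List.replicate (e + (seg.length + s - st)) "." ++ List.replicate st "#")) := by
  intro seg
  induction seg with
  | nil => intro conv s e _; simp [aLoop, settleGo]
  | cons x r ih =>
    intro conv s e hmem
    have hx : x ≠ "*" := by intro h; exact hmem (by simp [h])
    have hr : "*" ∉ r := fun h => hmem (by simp [h])
    by_cases h1 : x = "#"
    · rw [show aLoop (x :: r) conv s e = aLoop r conv (s + 1) e by simp [aLoop, h1],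
        show settleGo (x :: r) s = settleGo r (s + 1) by simp [settleGo, h1], ih conv (s + 1) e hr]
      cases hgo : settleGo r (s + 1) with
      | none => rfl
      | some st =>
        have hb := settleGo_bounds r (s + 1) st hgo
        simp only [Option.map_some]
        have : e + (r.length + (s + 1) - st) = e + ((x :: r).length + s - st) := by
          simp; omega
        rw [this]
    · by_cases h2 : x = "."
      · rw [show aLoop (x :: r) conv s e = aLoop r conv s (e + 1) by simp [aLoop, h2],
          show settleGo (x :: r) s = settleGo r s by simp [settleGo, h2], ih conv s (e + 1) hr]
        cases hgo : settleGo r s with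
        | none => rfl
        | some st =>
          have hb := settleGo_bounds r s st hgo
          simp only [Option.map_some]
          have : e + 1 + (r.length + s - st) = e + ((x :: r).length + s - st) := by
            simp; omega
          rw [this]
      · simp [aLoop, settleGo, hx, h1, h2]

-- A's loop across the first obstacle: flush the tallies, reset, continue.
theorem aLoop_star :
    ∀ (seg r2 conv : List String) (s e : Nat), "*" ∉ seg →
      aLoop (seg ++ "*" :: r2) conv s e =
        match settleGo seg s with
        | none => none
        | some st =>
          aLoop r2 (conv ++ (List.replicate (e + (seg.length + s - st)) "." ++
            List.replicate st "#" ++ ["*"])) 0 0 := by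
  intro seg
  induction seg with
  | nil =>
    intro r2 conv s e _
    simp [aLoop, settleGo]
  | cons x r ih =>
    intro r2 conv s e hmem
    have hx : x ≠ "*" := by intro h; exact hmem (by simp [h])
    have hr : "*" ∉ r := fun h => hmem (by simp [h])
    by_cases h1 : x = "#"
    · rw [show aLoop ((x :: r) ++ "*" :: r2) conv s e = aLoop (r ++ "*" :: r2) conv (s + 1) e by
        simp [aLoop, h1], ih r2 conv (s + 1) e hr,
        show settleGo (x :: r) s = settleGo r (s + 1) by simp [settleGo, h1]]
      cases hgo : settleGo r (s + 1) with
      | none => rfl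
      | some st =>
        have hb := settleGo_bounds r (s + 1) st hgo
        simp only
        have : e + (r.length + (s + 1) - st) = e + ((x :: r).length + s - st) := by
          simp; omega
        rw [this]
    · by_cases h2 : x = "."
      · rw [show aLoop ((x :: r) ++ "*" :: r2) conv s e = aLoop (r ++ "*" :: r2) conv s (e + 1) by
          simp [aLoop, h2], ih r2 conv s (e + 1) hr,
          show settleGo (x :: r) s = settleGo r s by simp [settleGo, h2]]
        cases hgo : settleGo r s with
        | none => rfl
        | some st =>
          have hb := settleGo_bounds r s st hgo
          simp only
          have : e + 1 + (r.length + s - st) = e + ((x :: r).length + s - st) := by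
            simp; omega
          rw [this]
      · simp [aLoop, settleGo, hx, h1, h2]

theorem aLoop_eq_altLoop (res rest : List String) : aLoop rest res 0 0 = altLoop res rest := by
  by_cases h : "*" ∈ rest
  · obtain ⟨i, hi⟩ := Option.isSome_iff_exists.mp ((PySem.List.index?_isSome_iff rest "*").mpr h)
    obtain ⟨pre, suf, hsplit, hlen, hnotin⟩ := (PySem.List.index?_eq_some_iff rest "*" i).mp hi
    have htake : rest.take i = pre := by rw [hsplit, ← hlen, List.take_left]
    have hdrop : rest.drop (i + 1) = suf := by
      rw [hsplit, ← hlen, show pre ++ "*" :: suf = (pre ++ ["*"]) ++ suf by simp]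
      exact List.drop_left' (by simp)
    rw [altLoop, dif_pos h]
    simp only [hi, Option.getD_some, htake, hdrop]
    rw [hsplit, aLoop_star pre suf res 0 0 hnotin]
    unfold settle
    cases hgo : settleGo pre 0 with
    | none => rfl
    | some st =>
      have hb := settleGo_bounds pre 0 st hgo
      simp only [Option.map_some]
      have harr : 0 + (pre.length + 0 - st) = pre.length - st := by omega
      rw [harr]
      have := aLoop_eq_altLoop
        (res ++ (List.replicate (pre.length - st) "." ++ List.replicate st "#") ++ ["*"]) suf
      simp only [List.append_assoc] at this ⊢
      exact this
  · rw [altLoop, dif_neg h, aLoop_noStar rest res 0 0 h]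
    unfold settle
    cases hgo : settleGo rest 0 with
    | none => rfl
    | some st =>
      have hb := settleGo_bounds rest 0 st hgo
      simp only [Option.map_some]
      have : 0 + (rest.length + 0 - st) = rest.length - st := by omega
      rw [this]
termination_by rest.length
decreasing_by
  rw [hsplit]
  simp only [List.length_append, List.length_cons]
  omega


-- ===== VERDICT (by name: the statement is the Claim_ definition above) =====
theorem convert_py_spec : Claim_equal_convert_py := by
  intro row _ _
  unfold Spec_convert_py convert_py convert_py_alt
  rw [aLoop_eq_altLoop]
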